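-- pv_equiv track=rewrite | github.com/sivel/ansible-playbooks | filter_plugins/weight_sort.py | weight_sort
-- ===== SOURCE A (Python) =====
-- def weight_sort(v, weights, reverse=False):
--     weight_len = len(weights)
--
--     def _key(vv):
--         for i, w in enumerate(weights):
--             if w.lower() in vv.lower():
--                 return (i, vv)
--         return (weight_len, vv)
--
--     return sorted(v, key=_key, reverse=reverse)
-- ===== SOURCE B (Python) =====
-- def weight_sort(v, weights, reverse=False):
--     wl = [w.lower() for w in weights]
--     n = len(wl)
--
--     def idx(vv):
--         low = vv.lower()
--         for i, w in enumerate(wl):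
--             if w in low:
--                 return i
--         return n
--
--     keyed = [(idx(x), x) for x in v]
--     buckets = [[x for (k, x) in keyed if k == i] for i in range(n + 1)]
--     if reverse:
--         buckets.reverse()
--     return [x for b in buckets for x in sorted(b, reverse=reverse)]
-- ===== Notes on version B (the rewrite author's own statement) =====
-- stated objective: alternative
-- what changed: Replaces the single stable sort under a (match-index, value) tuple key by a bucket decomposition: each element's first-matching-weight index is computed once, elements are partitioned into buckets per index, each bucket is stably sorted by the string value alone, and the buckets are concatenated (in reversed order for reverse=True).
import Mathlib
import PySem

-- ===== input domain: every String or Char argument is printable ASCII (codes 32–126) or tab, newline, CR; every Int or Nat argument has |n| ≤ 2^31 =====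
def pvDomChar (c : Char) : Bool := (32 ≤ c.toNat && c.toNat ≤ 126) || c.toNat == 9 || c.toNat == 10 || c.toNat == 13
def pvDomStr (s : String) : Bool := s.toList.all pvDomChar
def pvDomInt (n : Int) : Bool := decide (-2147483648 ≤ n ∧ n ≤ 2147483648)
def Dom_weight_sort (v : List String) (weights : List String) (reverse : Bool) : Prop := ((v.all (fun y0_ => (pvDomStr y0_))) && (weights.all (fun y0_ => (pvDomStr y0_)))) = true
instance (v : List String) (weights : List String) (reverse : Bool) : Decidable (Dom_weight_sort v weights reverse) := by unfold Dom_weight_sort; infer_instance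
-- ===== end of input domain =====

-- B replaces A's single tuple-key sort by a bucket decomposition (partition by match index,
-- then per-bucket sorts by value); an alternative decomposition of the same task.

-- ===== PORT A =====
-- A's inner `_key` loop: first i with weights[i].lower() in vv.lower(), else the fallback len(weights)
def pvKeyScan (vv : String) (ws : List String) (i : Int) (fallback : Int) : Int :=
  match ws with
  | [] => fallback
  | w :: rest =>
      if PySem.Str.isIn (PySem.Str.lower w) (PySem.Str.lower vv) then i
      else pvKeyScan vv rest (i + 1) fallback

def weight_sort (v : List String) (weights : List String) (reverse : Bool) : List String :=
  let weight_len : Int := PySem.List.len weights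
  PySem.List.sorted2 v (fun vv => pvKeyScan vv weights 0 weight_len) (fun vv => vv) reverse

-- ===== PORT B =====
-- B's idx loop over the pre-lowered weights wl
def pvIdxScan (low : String) (wl : List String) (i : Int) (n : Int) : Int :=
  match wl with
  | [] => n
  | w :: rest => if PySem.Str.isIn w low then i else pvIdxScan low rest (i + 1) n

def weight_sort_alt (v : List String) (weights : List String) (reverse : Bool) : List String :=
  let wl := weights.map PySem.Str.lower
  let n : Int := PySem.List.len wl
  let keyed := v.map (fun x => (pvIdxScan (PySem.Str.lower x) wl 0 n, x))
  let buckets := (PySem.List.pyRange 0 (n + 1) 1).map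
    (fun i => (keyed.filter (fun p => p.1 == i)).map (fun p => p.2))
  let buckets' := if reverse then buckets.reverse else buckets
  (buckets'.map (fun b => PySem.List.sorted b (fun x => x) reverse)).flatten

-- ===== PRECONDITION & SPEC =====
def Spec_weight_sort (v : List String) (weights : List String) (reverse : Bool) (out : List String) : Prop := out = weight_sort_alt v weights reverse
instance (v : List String) (weights : List String) (reverse : Bool) (out : List String) : Decidable (Spec_weight_sort v weights reverse out) := by unfold Spec_weight_sort; infer_instance

-- ===== CLAIM (what is proved, stated in full; the proofs are below) =====
def Claim_equal_weight_sort : Prop := ∀ (v : List String) (weights : List String) (reverse : Bool), Dom_weight_sort v weights reverse → Spec_weight_sort v weights reverse (weight_sort v weights reverse)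

-- ===== LEMMAS AND PROOFS =====

-- Python's lexicographic tuple comparison (k1 x, x) < (k1 y, y), as sorted2 uses it
def pvLt2 (k1 : String → Int) (a b : String) : Bool :=
  decide (k1 a < k1 b) || (!decide (k1 b < k1 a) && decide (a < b))

theorem pvLt2_of_gt (k1 : String → Int) (x y : String) (h : k1 y < k1 x) : pvLt2 k1 x y = false := by
  have h1 : decide (k1 x < k1 y) = false := decide_eq_false (by omega)
  have h2 : decide (k1 y < k1 x) = true := decide_eq_true h
  simp [pvLt2, h1, h2]

theorem pvLt2_of_lt (k1 : String → Int) (x y : String) (h : k1 x < k1 y) : pvLt2 k1 x y = true := by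
  have h1 : decide (k1 x < k1 y) = true := decide_eq_true h
  simp [pvLt2, h1]

theorem pvLt2_of_eq (k1 : String → Int) (x y : String) (h : k1 x = k1 y) :
    pvLt2 k1 x y = decide (x < y) := by
  have h1 : decide (k1 x < k1 y) = false := decide_eq_false (by omega)
  have h2 : decide (k1 y < k1 x) = false := decide_eq_false (by omega)
  simp [pvLt2, h1, h2]

theorem pv_insertBy_nil {α : Type} (before : α → α → Bool) (x : α) :
    PySem.List.insertBy before x [] = [x] := rfl

theorem pv_insertBy_cons {α : Type} (before : α → α → Bool) (x y : α) (t : List α) :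
    PySem.List.insertBy before x (y :: t) =
      if before x y then x :: y :: t else y :: PySem.List.insertBy before x t := rfl

theorem pv_insertBy_append_of_false {α : Type} (before : α → α → Bool) (x : α) (L R : List α)
    (h : ∀ y ∈ L, before x y = false) :
    PySem.List.insertBy before x (L ++ R) = L ++ PySem.List.insertBy before x R := by
  induction L with
  | nil => rfl
  | cons l t ih =>
      rw [List.cons_append, pv_insertBy_cons, h l (by simp), if_neg (by simp), List.cons_append]
      exact congrArg (l :: ·) (ih (fun y hy => h y (by simp [hy])))

theorem pv_insertBy_append_of_true {α : Type} (before : α → α → Bool) (x : α) (R S : List α)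
    (h : ∀ y ∈ S, before x y = true) :
    PySem.List.insertBy before x (R ++ S) = PySem.List.insertBy before x R ++ S := by
  induction R with
  | nil =>
      cases S with
      | nil => rfl
      | cons s t =>
          rw [List.nil_append, pv_insertBy_cons, h s (by simp), if_pos rfl, pv_insertBy_nil]
          rfl
  | cons r t ih =>
      rw [List.cons_append, pv_insertBy_cons, pv_insertBy_cons]
      by_cases hb : before x r = true
      · rw [if_pos hb, if_pos hb]
        rfl
      · rw [if_neg hb, if_neg hb, List.cons_append]
        exact congrArg (r :: ·) ih

theorem pv_insertBy_congr {α : Type} (before before' : α → α → Bool) (x : α) (L : List α)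
    (h : ∀ y ∈ L, before x y = before' x y) :
    PySem.List.insertBy before x L = PySem.List.insertBy before' x L := by
  induction L with
  | nil => rfl
  | cons l t ih =>
      rw [pv_insertBy_cons, pv_insertBy_cons, h l (by simp)]
      by_cases hb : before' x l = true
      · rw [if_pos hb, if_pos hb]
      · rw [if_neg hb, if_neg hb]
        exact congrArg (l :: ·) (ih (fun y hy => h y (by simp [hy])))

theorem pv_sorted2_false_concat (k1 : String → Int) (v : List String) (x : String) :
    PySem.List.sorted2 (v ++ [x]) k1 (fun y => y) false =
      PySem.List.insertBy (pvLt2 k1) x (PySem.List.sorted2 v k1 (fun y => y) false) := by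
  show (v ++ [x]).foldl (fun acc y => PySem.List.insertBy (pvLt2 k1) y acc) [] = _
  rw [List.foldl_append]
  rfl

theorem pv_sorted2_true_concat (k1 : String → Int) (v : List String) (x : String) :
    PySem.List.sorted2 (v ++ [x]) k1 (fun y => y) true =
      PySem.List.insertBy (fun a b => pvLt2 k1 b a) x (PySem.List.sorted2 v k1 (fun y => y) true) := by
  show (v ++ [x]).foldl (fun acc y => PySem.List.insertBy (fun a b => pvLt2 k1 b a) y acc) [] = _
  rw [List.foldl_append]
  rfl

theorem pv_sorted_false_concat (b : List String) (x : String) :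
    PySem.List.sorted (b ++ [x]) (fun y => y) false =
      PySem.List.insertBy (fun a c => decide (a < c)) x (PySem.List.sorted b (fun y => y) false) := by
  rw [PySem.List.sorted_eq_foldl_insertBy, PySem.List.sorted_eq_foldl_insertBy, List.foldl_append]
  rfl

theorem pv_sorted_true_concat (b : List String) (x : String) :
    PySem.List.sorted (b ++ [x]) (fun y => y) true =
      PySem.List.insertBy (fun a c => decide (c < a)) x (PySem.List.sorted b (fun y => y) true) := by
  rw [PySem.List.sorted_rev_eq_foldl_insertBy, PySem.List.sorted_rev_eq_foldl_insertBy, List.foldl_append]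
  rfl

-- bucket decomposition of the stable tuple-key sort, ascending buckets
theorem pv_bucket_false (k1 : String → Int) (is : List Int) (his : is.Pairwise (· < ·)) :
    ∀ v : List String, (∀ y ∈ v, k1 y ∈ is) →
    PySem.List.sorted2 v k1 (fun y => y) false =
      (is.map (fun i => PySem.List.sorted (v.filter (fun y => k1 y == i)) (fun y => y) false)).flatten := by
  intro v
  induction v using List.reverseRecOn with
  | nil =>
      intro _
      show ([] : List String) = _
      symm
      rw [List.flatten_eq_nil_iff]
      intro l hl
      rw [List.mem_map] at hl
      obtain ⟨i, -, rfl⟩ := hl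
      rfl
  | append_singleton v x ih =>
      intro hv
      have hx : k1 x ∈ is := hv x (by simp)
      have hv' : ∀ y ∈ v, k1 y ∈ is := fun y hy => hv y (by simp [hy])
      obtain ⟨pre, suf, hsplit⟩ := List.append_of_mem hx
      subst hsplit
      rw [List.pairwise_append] at his
      have hpre : ∀ i ∈ pre, i < k1 x := fun i hi => his.2.2 i hi (k1 x) (by simp)
      have hsuf : ∀ j ∈ suf, k1 x < j := (List.pairwise_cons.mp his.2.1).1
      have hfilter_ne : ∀ i : Int, k1 x ≠ i →
          (v ++ [x]).filter (fun y => k1 y == i) = v.filter (fun y => k1 y == i) := by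
        intro i hi
        simp [List.filter_append, hi]
      have hfilter_eq : (v ++ [x]).filter (fun y => k1 y == k1 x) =
          v.filter (fun y => k1 y == k1 x) ++ [x] := by
        simp [List.filter_append]
      rw [pv_sorted2_false_concat, ih hv']
      simp only [List.map_append, List.map_cons, List.flatten_append, List.flatten_cons]
      have hmapre : pre.map (fun i => PySem.List.sorted ((v ++ [x]).filter (fun y => k1 y == i)) (fun y => y) false)
          = pre.map (fun i => PySem.List.sorted (v.filter (fun y => k1 y == i)) (fun y => y) false) := by
        apply List.map_congr_left
        intro i hi
        rw [hfilter_ne i (by have := hpre i hi; omega)]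
      have hmasuf : suf.map (fun i => PySem.List.sorted ((v ++ [x]).filter (fun y => k1 y == i)) (fun y => y) false)
          = suf.map (fun i => PySem.List.sorted (v.filter (fun y => k1 y == i)) (fun y => y) false) := by
        apply List.map_congr_left
        intro i hi
        rw [hfilter_ne i (by have := hsuf i hi; omega)]
      rw [hmapre, hmasuf, hfilter_eq, pv_sorted_false_concat]
      rw [pv_insertBy_append_of_false (pvLt2 k1) x _ _ ?hL]
      case hL =>
        intro y hy
        simp only [List.mem_flatten, List.mem_map] at hy
        obtain ⟨l, ⟨i, hi, rfl⟩, hyl⟩ := hy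
        rw [PySem.List.mem_sorted] at hyl
        have : k1 y = i := by simpa using (List.mem_filter.mp hyl).2
        exact pvLt2_of_gt k1 x y (by have := hpre i hi; omega)
      congr 1
      rw [pv_insertBy_append_of_true (pvLt2 k1) x _ _ ?hS]
      case hS =>
        intro y hy
        simp only [List.mem_flatten, List.mem_map] at hy
        obtain ⟨l, ⟨i, hi, rfl⟩, hyl⟩ := hy
        rw [PySem.List.mem_sorted] at hyl
        have : k1 y = i := by simpa using (List.mem_filter.mp hyl).2
        exact pvLt2_of_lt k1 x y (by have := hsuf i hi; omega)
      congr 1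
      apply pv_insertBy_congr
      intro y hy
      rw [PySem.List.mem_sorted] at hy
      have : k1 y = k1 x := by simpa using (List.mem_filter.mp hy).2
      exact pvLt2_of_eq k1 x y this.symm

-- bucket decomposition of the stable tuple-key sort, descending buckets (reverse=True)
theorem pv_bucket_true (k1 : String → Int) (is : List Int) (his : is.Pairwise (fun a b => b < a)) :
    ∀ v : List String, (∀ y ∈ v, k1 y ∈ is) →
    PySem.List.sorted2 v k1 (fun y => y) true =
      (is.map (fun i => PySem.List.sorted (v.filter (fun y => k1 y == i)) (fun y => y) true)).flatten := by
  intro v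
  induction v using List.reverseRecOn with
  | nil =>
      intro _
      show ([] : List String) = _
      symm
      rw [List.flatten_eq_nil_iff]
      intro l hl
      rw [List.mem_map] at hl
      obtain ⟨i, -, rfl⟩ := hl
      rfl
  | append_singleton v x ih =>
      intro hv
      have hx : k1 x ∈ is := hv x (by simp)
      have hv' : ∀ y ∈ v, k1 y ∈ is := fun y hy => hv y (by simp [hy])
      obtain ⟨pre, suf, hsplit⟩ := List.append_of_mem hx
      subst hsplit
      rw [List.pairwise_append] at his
      have hpre : ∀ i ∈ pre, k1 x < i := fun i hi => his.2.2 i hi (k1 x) (by simp)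
      have hsuf : ∀ j ∈ suf, j < k1 x := (List.pairwise_cons.mp his.2.1).1
      have hfilter_ne : ∀ i : Int, k1 x ≠ i →
          (v ++ [x]).filter (fun y => k1 y == i) = v.filter (fun y => k1 y == i) := by
        intro i hi
        simp [List.filter_append, hi]
      have hfilter_eq : (v ++ [x]).filter (fun y => k1 y == k1 x) =
          v.filter (fun y => k1 y == k1 x) ++ [x] := by
        simp [List.filter_append]
      rw [pv_sorted2_true_concat, ih hv']
      simp only [List.map_append, List.map_cons, List.flatten_append, List.flatten_cons]
      have hmapre : pre.map (fun i => PySem.List.sorted ((v ++ [x]).filter (fun y => k1 y == i)) (fun y => y) true)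
          = pre.map (fun i => PySem.List.sorted (v.filter (fun y => k1 y == i)) (fun y => y) true) := by
        apply List.map_congr_left
        intro i hi
        rw [hfilter_ne i (by have := hpre i hi; omega)]
      have hmasuf : suf.map (fun i => PySem.List.sorted ((v ++ [x]).filter (fun y => k1 y == i)) (fun y => y) true)
          = suf.map (fun i => PySem.List.sorted (v.filter (fun y => k1 y == i)) (fun y => y) true) := by
        apply List.map_congr_left
        intro i hi
        rw [hfilter_ne i (by have := hsuf i hi; omega)]
      rw [hmapre, hmasuf, hfilter_eq, pv_sorted_true_concat]
      rw [pv_insertBy_append_of_false (fun a b => pvLt2 k1 b a) x _ _ ?hL]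
      case hL =>
        intro y hy
        simp only [List.mem_flatten, List.mem_map] at hy
        obtain ⟨l, ⟨i, hi, rfl⟩, hyl⟩ := hy
        rw [PySem.List.mem_sorted] at hyl
        have : k1 y = i := by simpa using (List.mem_filter.mp hyl).2
        exact pvLt2_of_gt k1 y x (by have := hpre i hi; omega)
      congr 1
      rw [pv_insertBy_append_of_true (fun a b => pvLt2 k1 b a) x _ _ ?hS]
      case hS =>
        intro y hy
        simp only [List.mem_flatten, List.mem_map] at hy
        obtain ⟨l, ⟨i, hi, rfl⟩, hyl⟩ := hy
        rw [PySem.List.mem_sorted] at hyl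
        have : k1 y = i := by simpa using (List.mem_filter.mp hyl).2
        exact pvLt2_of_lt k1 y x (by have := hsuf i hi; omega)
      congr 1
      apply pv_insertBy_congr
      intro y hy
      rw [PySem.List.mem_sorted] at hy
      have : k1 y = k1 x := by simpa using (List.mem_filter.mp hy).2
      exact pvLt2_of_eq k1 y x this

-- A's key scan equals B's scan over the pre-lowered weights
theorem pv_scan_eq (vv : String) : ∀ (ws : List String) (i fb : Int),
    pvKeyScan vv ws i fb = pvIdxScan (PySem.Str.lower vv) (ws.map PySem.Str.lower) i fb := by
  intro ws
  induction ws with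
  | nil => intro i fb; rfl
  | cons w t ih =>
      intro i fb
      simp only [pvKeyScan, pvIdxScan, List.map_cons]
      split
      · rfl
      · exact ih (i + 1) fb

theorem pv_idx_bounds (low : String) : ∀ (wl : List String) (i n : Int),
    pvIdxScan low wl i n = n ∨
      (i ≤ pvIdxScan low wl i n ∧ pvIdxScan low wl i n < i + wl.length) := by
  intro wl
  induction wl with
  | nil => intro i n; exact Or.inl rfl
  | cons w t ih =>
      intro i n
      simp only [pvIdxScan, List.length_cons]
      split
      · right; constructor <;> omega
      · rcases ih (i + 1) n with h | ⟨h1, h2⟩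
        · exact Or.inl h
        · right; push_cast; constructor <;> omega

theorem pv_keyed_filter (f : String → Int) (i : Int) : ∀ v : List String,
    ((v.map (fun x => (f x, x))).filter (fun p => p.1 == i)).map (fun p => p.2) =
      v.filter (fun y => f y == i) := by
  intro v
  induction v with
  | nil => rfl
  | cons a t ih =>
      simp only [List.map_cons, List.filter_cons]
      by_cases h : (f a == i) = true
      · simp [h, ih]
      · simp only [Bool.not_eq_true] at h
        simp [h, ih]

-- assemble: sorted2 under k1 with values in [0, m] is the flatten of its buckets
theorem pv_ws (k1 : String → Int) (m : Nat)
    (hbound : ∀ y : String, 0 ≤ k1 y ∧ k1 y < (m : Int) + 1) (v : List String) (reverse : Bool) :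
    PySem.List.sorted2 v k1 (fun y => y) reverse =
      ((if reverse then (PySem.List.pyRange 0 ((m : Int) + 1) 1).reverse
        else PySem.List.pyRange 0 ((m : Int) + 1) 1).map
        (fun i => PySem.List.sorted (v.filter (fun y => k1 y == i)) (fun y => y) reverse)).flatten := by
  have hrange : PySem.List.pyRange 0 ((m : Int) + 1) 1 =
      List.map (fun k : Nat => (k : Int)) (List.range (m + 1)) := by
    rw [show ((m : Int) + 1) = ((m + 1 : Nat) : Int) by push_cast; ring]
    exact PySem.List.pyRange_zero_natCast _
  have hpair : (PySem.List.pyRange 0 ((m : Int) + 1) 1).Pairwise (· < ·) := by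
    rw [hrange]
    exact List.Pairwise.map _ (fun a b h => by exact_mod_cast h) List.pairwise_lt_range
  have hmem : ∀ y ∈ v, k1 y ∈ PySem.List.pyRange 0 ((m : Int) + 1) 1 := by
    intro y _
    rw [PySem.List.mem_pyRange_one]
    exact hbound y
  cases reverse with
  | false =>
      rw [if_neg (by simp)]
      exact pv_bucket_false k1 _ hpair v hmem
  | true =>
      rw [if_pos rfl]
      exact pv_bucket_true k1 _ (by rw [List.pairwise_reverse]; exact hpair) v
        (fun y hy => List.mem_reverse.mpr (hmem y hy))

-- ===== VERDICT (by name: the statement is the Claim_ definition above) =====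
theorem weight_sort_spec : Claim_equal_weight_sort := by
  intro v weights reverse _dom
  unfold Spec_weight_sort weight_sort weight_sort_alt
  simp only [PySem.List.len_eq, List.length_map]
  have hkey : (fun vv => pvKeyScan vv weights 0 (weights.length : Int)) =
      (fun vv => pvIdxScan (PySem.Str.lower vv) (weights.map PySem.Str.lower) 0 (weights.length : Int)) := by
    funext vv
    exact pv_scan_eq vv weights 0 _
  rw [hkey]
  have hbound : ∀ y : String,
      0 ≤ pvIdxScan (PySem.Str.lower y) (weights.map PySem.Str.lower) 0 (weights.length : Int) ∧
      pvIdxScan (PySem.Str.lower y) (weights.map PySem.Str.lower) 0 (weights.length : Int) < (weights.length : Int) + 1 := by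
    intro y
    rcases pv_idx_bounds (PySem.Str.lower y) (weights.map PySem.Str.lower) 0 (weights.length : Int)
      with h | ⟨h1, h2⟩
    · rw [h]
      constructor <;> omega
    · rw [List.length_map] at h2
      constructor <;> omega
  rw [pv_ws _ weights.length hbound v reverse]
  cases reverse with
  | false =>
      simp only [Bool.false_eq_true, if_false, List.map_map]
      congr 1
      apply List.map_congr_left
      intro i _
      simp only [Function.comp]
      rw [pv_keyed_filter]
  | true =>
      rw [if_pos rfl, if_pos rfl, ← List.map_reverse, List.map_map]
      congr 1
      apply List.map_congr_left
      intro i _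
      simp only [Function.comp]
      rw [pv_keyed_filter]
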